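-- pv_equiv track=rewrite | github.com/travisCxy/deblur | att_model_2.2/projects/sl/common.py | contains_frac
-- ===== SOURCE A (Python) =====
-- FRAC_SYMBOL = '~'
--
-- def contains_frac(codes):
--     start = -1
--     for ind, code in enumerate(codes):
--         if code == FRAC_SYMBOL:
--             if start == -1:
--                 start =  ind
--             else:
--                 part = codes[start: ind]
--                 if '/' in part:
--                     return True
--                 else:
--                     start = -1
--     return False
-- ===== SOURCE B (Python) =====
-- FRAC_SYMBOL = '~'
--
-- def contains_frac(codes):
--     marks = [i for i, c in enumerate(codes) if c == FRAC_SYMBOL]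
--     while len(marks) >= 2:
--         if '/' in codes[marks[0]:marks[1]]:
--             return True
--         marks = marks[2:]
--     return False
-- ===== Notes on version B (the rewrite author's own statement) =====
-- stated objective: alternative
-- what changed: Replaces A's single stateful scan (start sentinel reset on each closed pair) with a two-phase decomposition: collect all marker indices once, then consume them pairwise checking '/' in each slice.
import Mathlib
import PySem

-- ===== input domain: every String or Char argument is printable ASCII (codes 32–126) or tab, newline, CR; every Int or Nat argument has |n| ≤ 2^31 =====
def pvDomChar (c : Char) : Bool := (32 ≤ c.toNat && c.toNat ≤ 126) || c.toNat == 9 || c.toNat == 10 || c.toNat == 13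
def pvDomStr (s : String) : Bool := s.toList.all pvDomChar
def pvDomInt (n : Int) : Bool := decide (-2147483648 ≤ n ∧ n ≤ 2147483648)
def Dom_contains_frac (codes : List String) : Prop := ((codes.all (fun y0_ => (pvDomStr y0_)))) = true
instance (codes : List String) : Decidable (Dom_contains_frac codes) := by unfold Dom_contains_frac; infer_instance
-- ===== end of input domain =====

-- B replaces A's single stateful scan with a two-phase decomposition (collect marker
-- indices, then consume them pairwise); equivalence of the return values is proved below.

-- ===== PORT A =====
-- A's loop: state is 'start' (-1 = no open marker); walks the enumerated list.
def containsFracLoopA (codes : List String) : List (Int × String) → Int → Bool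
  | [], _ => false
  | (ind, code) :: rest, start =>
    if code = "~" then
      if start = -1 then containsFracLoopA codes rest ind
      else
        if (PySem.List.slice codes (some start) (some ind)).contains "/" then true
        else containsFracLoopA codes rest (-1)
    else containsFracLoopA codes rest start

def contains_frac (codes : List String) : Bool :=
  containsFracLoopA codes (PySem.List.enumerate codes) (-1)

-- ===== PORT B =====
-- B's while-loop: consume marks two at a time (marks[0], marks[1], marks = marks[2:]).
def pairLoopB (codes : List String) : List Int → Bool
  | a :: b :: rest =>
    if (PySem.List.slice codes (some a) (some b)).contains "/" then true
    else pairLoopB codes rest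
  | _ => false

def contains_frac_alt (codes : List String) : Bool :=
  let marks := (PySem.List.enumerate codes).filterMap
    (fun p => if p.2 = "~" then some p.1 else none)
  pairLoopB codes marks

-- ===== PRECONDITION & SPEC =====
def Spec_contains_frac (codes : List String) (out : Bool) : Prop := out = contains_frac_alt codes
instance (codes : List String) (out : Bool) : Decidable (Spec_contains_frac codes out) := by unfold Spec_contains_frac; infer_instance

-- ===== CLAIM (what is proved, stated in full; the proofs are below) =====
def Claim_equal_contains_frac : Prop := ∀ (codes : List String), Dom_contains_frac codes → Spec_contains_frac codes (contains_frac codes)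

-- ===== LEMMAS AND PROOFS =====

def marksOf (l : List (Int × String)) : List Int :=
  l.filterMap (fun p => if p.2 = "~" then some p.1 else none)

-- Every index produced by enumerate from a nonnegative start is nonnegative.
theorem enumerate_fst_nonneg {α : Type} (xs : List α) (s : Int) (hs : 0 ≤ s) :
    ∀ p ∈ PySem.List.enumerate xs s, 0 ≤ p.1 := by
  induction xs generalizing s with
  | nil => simp [PySem.List.enumerate_nil]
  | cons x xs ih =>
    intro p hp
    rw [PySem.List.enumerate_cons, List.mem_cons] at hp
    rcases hp with hp | hp
    · simp [hp]; omega
    · exact ih (s + 1) (by omega) p hp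

-- The core correspondence: A's stateful scan equals B's pairwise walk over the marks.
theorem loopA_eq_pairB (codes : List String) :
    ∀ l : List (Int × String), (∀ p ∈ l, 0 ≤ p.1) →
      (containsFracLoopA codes l (-1) = pairLoopB codes (marksOf l)) ∧
      (∀ a : Int, 0 ≤ a →
        containsFracLoopA codes l a = pairLoopB codes (a :: marksOf l)) := by
  intro l
  induction l with
  | nil =>
    intro _
    refine ⟨rfl, fun a _ => rfl⟩
  | cons p rest ih =>
    intro hnn
    obtain ⟨ind, code⟩ := p
    have hind : (0:Int) ≤ ind := hnn (ind, code) (List.mem_cons_self ..)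
    have hrest : ∀ q ∈ rest, 0 ≤ q.1 := fun q hq => hnn q (List.mem_cons_of_mem _ hq)
    obtain ⟨ih1, ih2⟩ := ih hrest
    constructor
    · by_cases hc : code = "~"
      · simp only [containsFracLoopA, marksOf, List.filterMap_cons, hc, reduceIte]
        exact ih2 ind hind
      · simp only [containsFracLoopA, marksOf, List.filterMap_cons, hc, reduceIte]
        exact ih1
    · intro a ha
      by_cases hc : code = "~"
      · have hane : ¬ (a = -1) := by omega
        simp only [containsFracLoopA, marksOf, List.filterMap_cons, hc,
          if_neg hane, reduceIte, pairLoopB]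
        split
        · rfl
        · exact ih1
      · simp only [containsFracLoopA, marksOf, List.filterMap_cons, hc, reduceIte]
        exact ih2 a ha

-- ===== VERDICT (by name: the statement is the Claim_ definition above) =====
theorem contains_frac_spec : Claim_equal_contains_frac := by
  intro codes _
  unfold Spec_contains_frac contains_frac contains_frac_alt
  exact (loopA_eq_pairB codes (PySem.List.enumerate codes)
    (enumerate_fst_nonneg codes 0 le_rfl)).1
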